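-- pv_equiv track=rewrite | github.com/Ranjit007ai/InterviewBit-ArrayBasedSolutions | Array_based_problems/hotel_booking_possible/solution1_orderof_nlogn.py | max_booking
-- ===== SOURCE A (Python) =====
-- def max_booking(arrival,departure,n,k):
--     ans = []
--     for i in range(0,n):
--         ans.append((arrival[i],1))
--         ans.append((departure[i],0))
--
--     ans.sort()
--     cur_active = 0
--     max_active = 0
--     for i in range(0,len(ans)):
--         if ans[i][1] == 1:
--             cur_active += 1
--             max_active = max(max_active,cur_active)
--         else:
--             cur_active -= 1
--     # if max active guest at any instance are more than avaiable rooms,return false,else return true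
--     return (k>=max_active)
-- ===== SOURCE B (Python) =====
-- def max_booking(arrival, departure, n, k):
--     m = max(n, 0)
--     arr = arrival[:m]
--     dep = departure[:m]
--     best = 0
--     for t in arr:
--         active = sum(1 for a in arr if a <= t) - sum(1 for d in dep if d <= t)
--         if active > best:
--             best = active
--     return k >= best
-- ===== Notes on version B (the rewrite author's own statement) =====
-- stated objective: simpler
-- what changed: B drops A's build-sort-scan of tagged events entirely: for each arrival time t it directly counts (#arrivals <= t) - (#departures <= t) over the first n bookings and keeps the running maximum (shorter and plainer, at the price of quadratic instead of O(n log n) time).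
import Mathlib
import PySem

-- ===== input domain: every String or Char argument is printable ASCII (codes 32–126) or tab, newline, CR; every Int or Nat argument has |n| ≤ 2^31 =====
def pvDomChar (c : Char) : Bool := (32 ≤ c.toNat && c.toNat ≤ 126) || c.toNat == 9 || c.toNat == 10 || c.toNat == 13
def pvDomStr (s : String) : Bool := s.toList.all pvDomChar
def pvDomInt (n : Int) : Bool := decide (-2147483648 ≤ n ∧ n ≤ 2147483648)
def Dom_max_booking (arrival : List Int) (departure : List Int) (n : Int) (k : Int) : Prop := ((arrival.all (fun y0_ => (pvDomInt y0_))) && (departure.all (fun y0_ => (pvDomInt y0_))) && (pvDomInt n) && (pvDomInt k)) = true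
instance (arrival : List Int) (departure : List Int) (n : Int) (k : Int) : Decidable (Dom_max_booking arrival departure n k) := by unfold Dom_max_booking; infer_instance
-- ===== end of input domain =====

-- B replaces A's build-sort-scan over tagged events by directly counting, for each arrival time t,
-- the overlaps (#arrivals ≤ t) − (#departures ≤ t); objective: simpler (no event list, no sort;
-- quadratic rather than O(n log n), so not faster).

-- ===== PORT A =====
def max_booking (arrival : List Int) (departure : List Int) (n : Int) (k : Int) : Bool :=
  let ans : List (Int × Int) := (PySem.List.pyRange 0 n).foldl
    (fun acc i => (acc ++ [(PySem.List.pyGetD arrival i 0, (1 : Int))])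
                  ++ [(PySem.List.pyGetD departure i 0, (0 : Int))]) []
  let ansS := PySem.List.sorted2 ans Prod.fst Prod.snd
  let res := (PySem.List.pyRange 0 (PySem.List.len ansS)).foldl
    (fun st i =>
      if (PySem.List.pyGetD ansS i (0, 0)).2 == 1 then (st.1 + 1, max st.2 (st.1 + 1))
      else (st.1 - 1, st.2)) ((0 : Int), (0 : Int))
  decide (k ≥ res.2)

-- ===== PORT B =====
def max_booking_alt (arrival : List Int) (departure : List Int) (n : Int) (k : Int) : Bool :=
  let arr := PySem.List.slice arrival none (some (max n 0))
  let dep := PySem.List.slice departure none (some (max n 0))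
  let best := arr.foldl (fun best t =>
    let active := (arr.countP (fun a => decide (a ≤ t)) : Int)
                  - (dep.countP (fun d => decide (d ≤ t)) : Int)
    if active > best then active else best) 0
  decide (k ≥ best)

-- ===== PRECONDITION & SPEC =====
-- A raises IndexError when n exceeds the length of either list; Pre_ excludes exactly that.
def Pre_max_booking (arrival : List Int) (departure : List Int) (n : Int) (k : Int) : Prop :=
  n ≤ (arrival.length : Int) ∧ n ≤ (departure.length : Int)
instance (arrival : List Int) (departure : List Int) (n : Int) (k : Int) : Decidable (Pre_max_booking arrival departure n k) := by unfold Pre_max_booking; infer_instance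
def pvWitness_max_booking : List Int × List Int × Int × Int := ([1, 2, 3], [2, 3, 4], 3, 1)

def Spec_max_booking (arrival : List Int) (departure : List Int) (n : Int) (k : Int) (out : Bool) : Prop := out = max_booking_alt arrival departure n k
instance (arrival : List Int) (departure : List Int) (n : Int) (k : Int) (out : Bool) : Decidable (Spec_max_booking arrival departure n k out) := by unfold Spec_max_booking; infer_instance

-- ===== CLAIM (what is proved, stated in full; the proofs are below) =====
def Claim_equal_max_booking : Prop := ∀ (arrival : List Int) (departure : List Int) (n : Int) (k : Int), Dom_max_booking arrival departure n k → Pre_max_booking arrival departure n k → Spec_max_booking arrival departure n k (max_booking arrival departure n k)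

-- ===== LEMMAS AND PROOFS =====

-- Python's lexicographic '<' on int pairs (exactly the comparison sorted2 uses).
def lexltb (a b : Int × Int) : Bool :=
  decide (a.1 < b.1) || (!decide (b.1 < a.1) && decide (a.2 < b.2))

-- 'a ≤lex b' as the relation the sorted list is Pairwise in.
def lexle (a b : Int × Int) : Prop := lexltb b a = false

def lexleb (a b : Int × Int) : Bool := !(lexltb b a)

-- running balance of an event list: +1 per arrival tag, −1 otherwise
def bal (l : List (Int × Int)) : Int :=
  (l.map (fun e => if e.2 == 1 then (1 : Int) else -1)).sum

-- one step of A's scan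
def stp (st : Int × Int) (e : Int × Int) : Int × Int :=
  if e.2 == 1 then (st.1 + 1, max st.2 (st.1 + 1)) else (st.1 - 1, st.2)

theorem bal_cons (e : Int × Int) (l : List (Int × Int)) :
    bal (e :: l) = (if e.2 == 1 then 1 else -1) + bal l := by
  simp [bal]

theorem lexltb_irrefl (a : Int × Int) : lexltb a a = false := by
  simp [lexltb]

theorem lexltb_antisymm {a b : Int × Int} (h1 : lexltb a b = false) (h2 : lexltb b a = false) :
    a = b := by
  simp only [lexltb, Bool.or_eq_false_iff, Bool.and_eq_false_iff, Bool.not_eq_false',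
    decide_eq_false_iff_not, decide_eq_true_eq, not_lt] at h1 h2
  refine Prod.ext ?_ ?_ <;> omega

theorem lexltb_trans {a b c : Int × Int} (h1 : lexltb a b = true) (h2 : lexltb b c = true) :
    lexltb a c = true := by
  simp only [lexltb, Bool.or_eq_true, Bool.and_eq_true, Bool.not_eq_true',
    decide_eq_false_iff_not, decide_eq_true_eq, not_lt] at h1 h2 ⊢
  omega

theorem pairwise_insertBy {x : Int × Int} {ys : List (Int × Int)} (h : ys.Pairwise lexle) :
    (PySem.List.insertBy lexltb x ys).Pairwise lexle := by
  induction ys with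
  | nil => simpa [PySem.List.insertBy] using List.pairwise_singleton lexle x
  | cons y ys ih =>
    rcases List.pairwise_cons.mp h with ⟨hy, hys⟩
    show (if lexltb x y then x :: y :: ys else y :: PySem.List.insertBy lexltb x ys).Pairwise lexle
    by_cases hxy : lexltb x y = true
    · rw [if_pos hxy]
      refine List.pairwise_cons.mpr ⟨?_, h⟩
      intro z hz
      rcases List.mem_cons.mp hz with rfl | hz
      · -- z = y : need lexltb z x = false
        unfold lexle
        by_contra hcon
        have h2 := lexltb_trans (Bool.of_not_eq_false hcon) hxy
        rw [lexltb_irrefl] at h2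
        exact Bool.false_ne_true h2
      · -- z ∈ ys : lexle y z holds, and lexltb x y, so lexltb z x = false
        have hyz : lexltb z y = false := hy z hz
        unfold lexle
        by_contra hcon
        have h2 := lexltb_trans (Bool.of_not_eq_false hcon) hxy
        rw [hyz] at h2
        exact Bool.false_ne_true h2
    · rw [if_neg hxy]
      refine List.pairwise_cons.mpr ⟨?_, ih hys⟩
      intro z hz
      rcases (PySem.List.mem_insertBy lexltb x z ys).mp hz with rfl | hz
      · exact Bool.eq_false_iff.mpr hxy
      · exact hy z hz

theorem pairwise_sorted2 (xs : List (Int × Int)) :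
    (PySem.List.sorted2 xs Prod.fst Prod.snd).Pairwise lexle := by
  have key : ∀ (l : List (Int × Int)) (acc : List (Int × Int)), acc.Pairwise lexle →
      (l.foldl (fun acc x => PySem.List.insertBy lexltb x acc) acc).Pairwise lexle := by
    intro l
    induction l with
    | nil => intro acc h; exact h
    | cons x l ih => intro acc h; exact ih _ (pairwise_insertBy h)
  exact key xs [] List.Pairwise.nil

-- folding max distributes over a max in the initial accumulator
theorem foldl_max_init (g : Int × Int → Int) (l : List (Int × Int)) (m v : Int) :
    l.foldl (fun b e => max b (g e)) (max m v) = max (l.foldl (fun b e => max b (g e)) m) v := by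
  induction l generalizing m with
  | nil => rfl
  | cons e l ih =>
    simp only [List.foldl_cons]
    rw [show max (max m v) (g e) = max (max m (g e)) v by omega, ih]

-- KEY: on a lex-sorted event list, A's scan maximum is the max over arrival events e of
-- the balance of the (≤lex e)-prefix.
theorem scan_snd (l : List (Int × Int)) (hl : l.Pairwise lexle) (c m : Int) :
    (l.foldl stp (c, m)).2 =
      l.foldl (fun b e => if e.2 == 1 then max b (c + bal (l.filter (fun x => lexleb x e))) else b) m := by
  induction l generalizing c m with
  | nil => rfl
  | cons e rest ih =>
    rcases List.pairwise_cons.mp hl with ⟨he, hrest⟩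
    by_cases he2 : (e.2 == 1) = true
    · -- arrival event at the head
      have he2' : e.2 = 1 := by simpa using he2
      have hstep : stp (c, m) e = (c + 1, max m (c + 1)) := by simp [stp, he2]
      have hee : lexleb e e = true := by simp [lexleb, lexltb_irrefl]
      -- elements of rest that are ≤lex e are literally e
      have hfe : rest.filter (fun x => lexleb x e) = rest.filter (fun x => x == e) := by
        apply List.filter_congr
        intro x hx
        have hex : lexltb x e = false := he x hx
        by_cases hxe : x = e
        · simp [hxe, lexleb, lexltb_irrefl]
        · have hlt : lexltb e x = true := by
            by_contra hcon
            exact hxe (lexltb_antisymm hex (Bool.of_not_eq_true hcon))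
          simp [lexleb, hlt, hxe]
      set q : Int := (rest.count e : Int) with hq
      have hbale : bal (rest.filter (fun x => lexleb x e)) = q := by
        rw [hfe, List.filter_beq, bal, List.map_replicate, List.sum_replicate, he2']
        simp only [BEq.rfl, if_pos, nsmul_eq_mul, mul_one]
        exact hq.symm
      have hq0 : 0 ≤ q := by positivity
      simp only [List.foldl_cons, hstep, he2, if_pos, ih hrest]
      have hbody : ∀ x ∈ rest, ∀ b : Int,
          (if x.2 == 1 then max b (c + bal ((e :: rest).filter (fun y => lexleb y x))) else b)
          = (if x.2 == 1 then max b (c + 1 + bal (rest.filter (fun y => lexleb y x))) else b) := by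
        intro x hx b
        by_cases hx2 : (x.2 == 1) = true
        · have hh : lexltb x e = false := he x hx
          have hex : lexleb e x = true := by simp [lexleb, hh]
          rw [if_pos hx2, if_pos hx2, List.filter_cons, if_pos hex, bal_cons, if_pos he2]
          have hb := bal (rest.filter (fun y => lexleb y x))
          omega
        · simp [hx2]
      have hinit : bal ((e :: rest).filter (fun x => lexleb x e)) = 1 + q := by
        rw [List.filter_cons, if_pos hee, bal_cons, if_pos he2, hbale]
      rw [hinit,
        PySem.List.foldl_congr_mem' rest _ _ (max m (c + (1 + q))) hbody,
        PySem.List.foldl_if_eq_foldl_filter (fun x => x.2 == 1)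
          (fun b x => max b (c + 1 + bal (rest.filter (fun y => lexleb y x)))),
        PySem.List.foldl_if_eq_foldl_filter (fun x => x.2 == 1)
          (fun b x => max b (c + 1 + bal (rest.filter (fun y => lexleb y x))))]
      set g : Int × Int → Int := fun x => c + 1 + bal (rest.filter (fun y => lexleb y x)) with hg
      set rl := rest.filter (fun x => x.2 == 1) with hrl
      show List.foldl (fun b e => max b (g e)) (max m (c + 1)) rl
          = List.foldl (fun b e => max b (g e)) (max m (c + (1 + q))) rl
      have hsplit : max m (c + (1 + q)) = max (max m (c + 1)) (c + 1 + q) := by omega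
      conv_rhs => rw [hsplit, foldl_max_init]
      rcases eq_or_lt_of_le hq0 with hq00 | hqpos
      · have h1 : c + 1 ≤ List.foldl (fun b e => max b (g e)) (max m (c + 1)) rl := by
          have h2 := (PySem.List.le_foldl_max_int rl g (max m (c + 1))).1
          omega
        omega
      · have hmem : e ∈ rl := by
          rw [hrl]
          refine List.mem_filter.mpr ⟨?_, he2⟩
          have hc : 0 < rest.count e := by omega
          exact List.count_pos_iff.mp hc
        have hge : g e = c + 1 + q := by rw [hg]; simp only [hbale]
        have h3 := (PySem.List.le_foldl_max_int rl g (max m (c + 1))).2 e hmem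
        omega
    · -- departure event at the head
      have hstep : stp (c, m) e = (c - 1, m) := by simp [stp, he2]
      simp only [List.foldl_cons, hstep, he2, if_neg, ih hrest]
      apply PySem.List.foldl_congr_mem'
      intro x hx b
      by_cases hx2 : (x.2 == 1) = true
      · have hh : lexltb x e = false := he x hx
        have hex : lexleb e x = true := by simp [lexleb, hh]
        rw [if_pos hx2, if_pos hx2, List.filter_cons, if_pos hex, bal_cons, if_neg he2]
        omega
      · simp [hx2]

-- interleaved pairs are, up to permutation, the two projections concatenated
theorem flatMap_pair_perm {α : Type} (u v : α → Int × Int) (l : List α) :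
    (l.flatMap (fun i => [u i, v i])).Perm (l.map u ++ l.map v) := by
  induction l with
  | nil => rfl
  | cons x l ih =>
    simp only [List.flatMap_cons, List.map_cons]
    refine List.Perm.trans (List.Perm.append_left [u x, v x] ih) ?_
    simp only [List.cons_append, List.nil_append]
    exact List.Perm.cons (u x) List.perm_middle.symm

theorem map_getD_range (xs : List Int) (m : Nat) (h : m ≤ xs.length) :
    (List.range m).map (fun j => xs.getD j 0) = xs.take m := by
  apply List.ext_getElem
  · simp [h]
  · intro j h1 h2
    simp only [List.getElem_map, List.getElem_range, List.getElem_take]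
    rw [List.getD_eq_getElem]

theorem lexleb_arr (a t : Int) : lexleb (a, 1) (t, 1) = decide (a ≤ t) := by
  by_cases h : a ≤ t <;> simp [lexleb, lexltb, h] <;> omega

theorem lexleb_dep (d t : Int) : lexleb (d, 0) (t, 1) = decide (d ≤ t) := by
  by_cases h : d ≤ t <;> simp [lexleb, lexltb, h] <;> omega

theorem bal_append (l1 l2 : List (Int × Int)) : bal (l1 ++ l2) = bal l1 + bal l2 := by
  simp [bal]

theorem bal_map_one (l : List Int) : bal (l.map (fun t => (t, (1 : Int)))) = l.length := by
  simp [bal, List.map_map, Function.comp_def, PySem.List.sum_map_const_int]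

theorem bal_map_zero (l : List Int) : bal (l.map (fun t => (t, (0 : Int)))) = -l.length := by
  simp [bal, List.map_map, Function.comp_def, PySem.List.sum_map_const_int]

-- ===== VERDICT (by name: the statement is the Claim_ definition above) =====
theorem max_booking_spec : Claim_equal_max_booking := by
  intro arrival departure n k _ hpre
  rcases hpre with ⟨h1, h2⟩
  unfold Spec_max_booking
  simp only [max_booking, max_booking_alt]
  by_cases hn : 0 ≤ n
  · -- the real case: n = ↑m with m ≤ both lengths
    set m : Nat := n.toNat with hmdef
    have hnm : n = (m : Int) := (Int.toNat_of_nonneg hn).symm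
    have hm1 : m ≤ arrival.length := by omega
    have hm2 : m ≤ departure.length := by omega
    rw [hnm, show max ((m : Nat) : Int) 0 = ((m : Nat) : Int) from by omega]
    set arr : List Int := arrival.take m with harr
    set dep : List Int := departure.take m with hdep
    set u : Int → Int × Int := fun t => (t, (1 : Int)) with hu
    set v : Int → Int × Int := fun t => (t, (0 : Int)) with hv
    set g : Int → Int := fun t =>
      (arr.countP (fun a => decide (a ≤ t)) : Int) - (dep.countP (fun d => decide (d ≤ t)) : Int)
      with hg
    -- slices on B's side
    have hs1 : PySem.List.slice arrival none (some ((m : Nat) : Int)) = arr := by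
      rw [PySem.List.slice_to _ (by positivity)]; simp [harr]
    have hs2 : PySem.List.slice departure none (some ((m : Nat) : Int)) = dep := by
      rw [PySem.List.slice_to _ (by positivity)]; simp [hdep]
    rw [hs1, hs2]
    -- A's first loop builds the interleaved event list
    set EV : List (Int × Int) :=
      (List.range m).flatMap (fun j => [(arrival.getD j 0, (1 : Int)), (departure.getD j 0, (0 : Int))])
      with hEV
    have h_ans : (PySem.List.pyRange 0 ((m : Nat) : Int)).foldl
        (fun acc i => (acc ++ [(PySem.List.pyGetD arrival i 0, (1 : Int))])
                      ++ [(PySem.List.pyGetD departure i 0, (0 : Int))]) [] = EV := by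
      rw [PySem.List.pyRange_zero_natCast, List.foldl_map,
        PySem.List.foldl_congr_mem' (List.range m) _
          (fun acc j => acc ++ [(arrival.getD j 0, (1 : Int)), (departure.getD j 0, (0 : Int))]) []
          (by intro j hj acc; simp [PySem.List.pyGetD_natCast]),
        PySem.List.foldl_append_eq_flatMap, List.nil_append, hEV]
    rw [h_ans]
    -- the two projections of EV
    have hmu : (List.range m).map (fun j => (arrival.getD j 0, (1 : Int))) = arr.map u := by
      rw [harr, ← map_getD_range arrival m hm1, List.map_map]; rfl
    have hmv : (List.range m).map (fun j => (departure.getD j 0, (0 : Int))) = dep.map v := by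
      rw [hdep, ← map_getD_range departure m hm2, List.map_map]; rfl
    have hEvPerm : EV.Perm (arr.map u ++ dep.map v) := by
      rw [hEV]
      have hp := flatMap_pair_perm (fun j => (arrival.getD j 0, (1 : Int)))
        (fun j => (departure.getD j 0, (0 : Int))) (List.range m)
      rw [hmu, hmv] at hp
      exact hp
    set ansS := PySem.List.sorted2 EV Prod.fst Prod.snd with hansS
    have hSP : ansS.Perm EV := PySem.List.sorted2_perm EV Prod.fst Prod.snd false
    have hPW : ansS.Pairwise lexle := pairwise_sorted2 EV
    -- A's second loop is a fold of stp over the sorted list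
    have h_loop : (PySem.List.pyRange 0 (PySem.List.len ansS)).foldl
        (fun st i =>
          if (PySem.List.pyGetD ansS i ((0 : Int), (0 : Int))).2 == 1 then (st.1 + 1, max st.2 (st.1 + 1))
          else (st.1 - 1, st.2)) ((0 : Int), (0 : Int)) = ansS.foldl stp ((0 : Int), (0 : Int)) := by
      conv_rhs => rw [← PySem.List.map_pyGetD_pyRange_zero ansS ((0 : Int), (0 : Int))]
      rw [List.foldl_map]
      rfl
    rw [h_loop, scan_snd ansS hPW 0 0]
    -- each arrival event's prefix balance is the overlap count at its time
    have hbal : ∀ P : Int × Int → Bool, bal (ansS.filter P) = bal ((arr.map u ++ dep.map v).filter P) := by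
      intro P
      unfold bal
      exact (((hSP.filter P).trans (hEvPerm.filter P)).map _).sum_eq
    have hterm : ∀ e ∈ ansS, (e.2 == 1) = true →
        0 + bal (ansS.filter (fun x => lexleb x e)) = g e.1 := by
      intro e he he2
      have he2' : e.2 = 1 := by simpa using he2
      have heq : e = (e.1, 1) := by rw [← he2']
      rw [hbal, List.filter_append, heq]
      rw [show (List.filter (fun x => lexleb x (e.1, 1)) (arr.map u))
            = (arr.filter (fun a => decide (a ≤ e.1))).map u by
          rw [List.filter_map]
          congr 1
          apply List.filter_congr
          intro a _
          simp only [Function.comp_apply, hu]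
          exact lexleb_arr a e.1]
      rw [show (List.filter (fun x => lexleb x (e.1, 1)) (dep.map v))
            = (dep.filter (fun d => decide (d ≤ e.1))).map v by
          rw [List.filter_map]
          congr 1
          apply List.filter_congr
          intro d _
          simp only [Function.comp_apply, hv]
          exact lexleb_dep d e.1]
      rw [bal_append, bal_map_one, bal_map_zero, hg]
      simp only [List.countP_eq_length_filter]
      ring
    rw [PySem.List.foldl_congr_mem' ansS _
        (fun b e => if e.2 == 1 then max b (g e.1) else b) 0
        (by
          intro e he b
          beta_reduce
          by_cases he2 : (e.2 == 1) = true
          · rw [if_pos he2, if_pos he2, hterm e he he2]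
          · rw [if_neg he2, if_neg he2]),
      PySem.List.foldl_if_eq_foldl_filter (fun e : Int × Int => e.2 == 1)
        (fun b e => max b (g e.1))]
    -- the filtered arrival events are (a permutation of) arr tagged with 1
    have hfiltPerm : (ansS.filter (fun e => e.2 == 1)).Perm (arr.map u) := by
      refine ((hSP.filter _).trans (hEvPerm.filter _)).trans ?_
      rw [List.filter_append,
        show List.filter (fun e => e.2 == 1) (arr.map u) = arr.map u by
          rw [List.filter_map]; simp [hu, Function.comp_def],
        show List.filter (fun e => e.2 == 1) (dep.map v) = [] by
          rw [List.filter_map]; simp [hv, Function.comp_def]]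
      simp
    haveI : RightCommutative (fun (b : Int) (e : Int × Int) => max b (g e.1)) :=
      ⟨fun b x y => by omega⟩
    rw [hfiltPerm.foldl_eq 0, List.foldl_map]
    -- B's loop is the same running maximum
    rw [PySem.List.foldl_congr_mem' arr
        (fun best t => if (arr.countP (fun a => decide (a ≤ t)) : Int)
              - (dep.countP (fun d => decide (d ≤ t)) : Int) > best
            then (arr.countP (fun a => decide (a ≤ t)) : Int)
              - (dep.countP (fun d => decide (d ≤ t)) : Int) else best)
        (fun b t => max b (g t)) 0
        (by intro t _ b; beta_reduce; rw [hg]; simp only [gt_iff_lt]; omega)]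
  · -- n < 0 : both programs see no bookings at all
    have hr : PySem.List.pyRange 0 n = [] := by
      simp only [PySem.List.pyRange]
      rw [if_neg (by omega : ¬ (1 : Int) = 0)]
      simp [show ¬ (0 : Int) < n by omega]
    have hmax : max n 0 = (0 : Int) := by omega
    rw [hr, hmax]
    rw [PySem.List.slice_to _ (by omega), PySem.List.slice_to _ (by omega)]
    simp [PySem.List.sorted2, PySem.List.len, PySem.List.pyRange]
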